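-- pv_equiv track=rewrite | github.com/KarolKozlowski22/Python_algs | alternative.py | solve
-- ===== SOURCE A (Python) =====
-- import math
--
-- def is_prime(num):
--     if num<2:
--         return False
--     for i in range(2,int(math.sqrt(num))+1):
--         if num%i==0:
--             return False
--     return True
--
-- def solve(T, idx, gold_in_hand):
--     if idx==len(T):
--         return gold_in_hand==0
--
--     for val in range(0, min(6, T[idx])+1):
--         new_gold_in_hand_1=gold_in_hand-val
--
--         if is_prime(T[idx]+val) and new_gold_in_hand_1>=0 and solve(T, idx+1, new_gold_in_hand_1):
--             return True
--
--         new_gold_in_hand_2=gold_in_hand+val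
--
--         if is_prime(T[idx]-val) and new_gold_in_hand_2 <=6 and solve(T, idx+1, new_gold_in_hand_2):
--             return True
--
--
--     return False
-- ===== SOURCE B (Python) =====
-- import math
--
-- def is_prime(num):
--     if num<2:
--         return False
--     for i in range(2,int(math.sqrt(num))+1):
--         if num%i==0:
--             return False
--     return True
--
-- def solve(T, idx, gold_in_hand):
--     # Forward DP: sweep the suffix once, maintaining the set of gold values
--     # reachable in hand after the positions processed so far; succeed iff 0 is
--     # reachable at the end.
--     n = len(T)
--     states = {gold_in_hand}
--     i = idx
--     while i != n:
--         t = T[i]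
--         new = set()
--         for g in states:
--             for val in range(0, min(6, t) + 1):
--                 if is_prime(t + val) and g - val >= 0:
--                     new.add(g - val)
--                 if is_prime(t - val) and g + val <= 6:
--                     new.add(g + val)
--         states = new
--         i += 1
--     return 0 in states
-- ===== Notes on version B (the rewrite author's own statement) =====
-- stated objective: alternative
-- what changed: Replaces the branching recursion with one forward dynamic-programming sweep that maintains the set of reachable gold-in-hand values per position and succeeds iff 0 is reachable at the end; it trades A's early-exit depth-first search for a single bounded-state pass.
import Mathlib
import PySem

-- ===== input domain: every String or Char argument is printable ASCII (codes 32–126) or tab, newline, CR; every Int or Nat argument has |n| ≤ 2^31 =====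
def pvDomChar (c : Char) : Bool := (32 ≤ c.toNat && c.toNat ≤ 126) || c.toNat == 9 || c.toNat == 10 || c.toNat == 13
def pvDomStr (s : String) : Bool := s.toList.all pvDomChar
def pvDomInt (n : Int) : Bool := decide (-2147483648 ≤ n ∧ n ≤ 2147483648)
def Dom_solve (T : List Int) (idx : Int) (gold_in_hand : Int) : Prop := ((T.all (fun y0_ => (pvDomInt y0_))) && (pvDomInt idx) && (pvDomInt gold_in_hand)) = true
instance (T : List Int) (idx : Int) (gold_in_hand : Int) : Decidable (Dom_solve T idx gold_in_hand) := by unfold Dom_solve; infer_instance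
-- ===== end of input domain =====

-- B replaces A's branching recursion by one forward dynamic-programming sweep over
-- the set of reachable gold values (objective: alternative).

-- ===== PORT A =====
-- shared module helper is_prime; int(math.sqrt(num)) equals Nat.sqrt num.toNat exactly
-- for every num reachable on Dom (|num| ≤ 2^31 + 6 < 2^52).
def isPrime (num : Int) : Bool :=
  if num < 2 then false
  else (PySem.List.pyRange 2 ((Nat.sqrt num.toNat : Int) + 1) 1).all
    (fun i => !(PySem.Int.mod num i == 0))

def solve (T : List Int) (idx : Int) (gold_in_hand : Int) : Bool :=
  if idx = (T.length : Int) then gold_in_hand == 0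
  else
    match h : PySem.List.pyGet? T idx with
    | none => false  -- Python raises IndexError here; excluded by Pre_solve
    | some t =>
      (PySem.List.pyRange 0 (min 6 t + 1) 1).any (fun val =>
        (isPrime (t + val) && decide (gold_in_hand - val ≥ 0) &&
          solve T (idx + 1) (gold_in_hand - val)) ||
        (isPrime (t - val) && decide (gold_in_hand + val ≤ 6) &&
          solve T (idx + 1) (gold_in_hand + val)))
termination_by ((T.length : Int) + 1 - idx).toNat
decreasing_by
  all_goals
    have hin : PySem.Raise.InRange T.length idx := by
      by_contra hc
      rw [(PySem.List.pyGet?_eq_none_iff T idx).mpr hc] at h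
      simp at h
    have h2 := hin.2
    omega

-- ===== PORT B =====
-- body of Source B's inner `for val` loop (two sequential conditional set-inserts)
def innerStep (t g : Int) (acc2 : List Int) (val : Int) : List Int :=
  let acc3 := if isPrime (t + val) && decide (g - val ≥ 0) then PySem.Set.add acc2 (g - val) else acc2
  if isPrime (t - val) && decide (g + val ≤ 6) then PySem.Set.add acc3 (g + val) else acc3

-- one DP step: the reachable-gold set after element t, from the set before it
def stepAlt (t : Int) (states : List Int) : List Int :=
  states.foldl (fun acc g => (PySem.List.pyRange 0 (min 6 t + 1) 1).foldl (innerStep t g) acc)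
    PySem.Set.empty

-- the `while i != n` sweep of Source B
def sweepAlt (T : List Int) (i : Int) (states : List Int) : List Int :=
  if i = (T.length : Int) then states
  else
    match h : PySem.List.pyGet? T i with
    | none => states  -- Python raises IndexError here; excluded by Pre_solve
    | some t => sweepAlt T (i + 1) (stepAlt t states)
termination_by ((T.length : Int) + 1 - i).toNat
decreasing_by
  all_goals
    have hin : PySem.Raise.InRange T.length i := by
      by_contra hc
      rw [(PySem.List.pyGet?_eq_none_iff T i).mpr hc] at h
      simp at h
    have h2 := hin.2
    omega

def solve_alt (T : List Int) (idx : Int) (gold_in_hand : Int) : Bool :=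
  PySem.Set.contains (sweepAlt T idx (PySem.Set.ofList [gold_in_hand])) 0

-- ===== PRECONDITION & SPEC =====
-- Pre_ excludes exactly the inputs where A raises IndexError at T[idx] (idx beyond
-- ±len); everywhere else A returns.
def Pre_solve (T : List Int) (idx : Int) (gold_in_hand : Int) : Prop :=
  -(T.length : Int) ≤ idx ∧ idx ≤ (T.length : Int)
instance (T : List Int) (idx : Int) (gold_in_hand : Int) : Decidable (Pre_solve T idx gold_in_hand) := by unfold Pre_solve; infer_instance

def pvWitness_solve : List Int × Int × Int := ([3, 4, 5], 0, 1)

def Spec_solve (T : List Int) (idx : Int) (gold_in_hand : Int) (out : Bool) : Prop := out = solve_alt T idx gold_in_hand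
instance (T : List Int) (idx : Int) (gold_in_hand : Int) (out : Bool) : Decidable (Spec_solve T idx gold_in_hand out) := by unfold Spec_solve; infer_instance

-- ===== CLAIM (what is proved, stated in full; the proofs are below) =====
def Claim_equal_solve : Prop := ∀ (T : List Int) (idx : Int) (gold_in_hand : Int), Dom_solve T idx gold_in_hand → Pre_solve T idx gold_in_hand → Spec_solve T idx gold_in_hand (solve T idx gold_in_hand)

-- ===== LEMMAS AND PROOFS =====

lemma mem_innerStep (t g y : Int) (acc2 : List Int) (v : Int) :
    y ∈ innerStep t g acc2 v ↔ y ∈ acc2 ∨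
      ((isPrime (t + v) = true ∧ 0 ≤ g - v ∧ y = g - v) ∨
       (isPrime (t - v) = true ∧ g + v ≤ 6 ∧ y = g + v)) := by
  simp only [innerStep]
  split_ifs with h1 h2 h2 <;>
    simp only [PySem.Set.mem_add, Bool.and_eq_true, decide_eq_true_eq, ge_iff_le,
      not_and] at * <;> tauto

lemma mem_innerFold (t g y : Int) (vs acc : List Int) :
    y ∈ vs.foldl (innerStep t g) acc ↔ y ∈ acc ∨ ∃ v ∈ vs,
      ((isPrime (t + v) = true ∧ 0 ≤ g - v ∧ y = g - v) ∨
       (isPrime (t - v) = true ∧ g + v ≤ 6 ∧ y = g + v)) := by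
  induction vs generalizing acc with
  | nil => simp
  | cons v vs ih =>
    rw [List.foldl_cons, ih, mem_innerStep, List.exists_mem_cons_iff, or_assoc]

lemma mem_stepAlt (t : Int) (states : List Int) (y : Int) :
    y ∈ stepAlt t states ↔ ∃ g ∈ states, ∃ v ∈ PySem.List.pyRange 0 (min 6 t + 1) 1,
      ((isPrime (t + v) = true ∧ 0 ≤ g - v ∧ y = g - v) ∨
       (isPrime (t - v) = true ∧ g + v ≤ 6 ∧ y = g + v)) := by
  unfold stepAlt
  have haux : ∀ (xs acc : List Int),
      y ∈ xs.foldl (fun acc g => (PySem.List.pyRange 0 (min 6 t + 1) 1).foldl (innerStep t g) acc) acc ↔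
      y ∈ acc ∨ ∃ g ∈ xs, ∃ v ∈ PySem.List.pyRange 0 (min 6 t + 1) 1,
        ((isPrime (t + v) = true ∧ 0 ≤ g - v ∧ y = g - v) ∨
         (isPrime (t - v) = true ∧ g + v ≤ 6 ∧ y = g + v)) := by
    intro xs
    induction xs with
    | nil => simp
    | cons g xs ih =>
      intro acc
      rw [List.foldl_cons, ih, mem_innerFold, List.exists_mem_cons_iff, or_assoc]
  rw [haux]
  simp [PySem.Set.empty]

-- the forward sweep reaches 0 iff some start value in `states` lets A succeed
lemma sweep_reaches_iff (T : List Int) :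
    ∀ (k : Nat) (i : Int), ((T.length : Int) - i).toNat = k →
      -(T.length : Int) ≤ i → i ≤ (T.length : Int) → ∀ states : List Int,
      (0 ∈ sweepAlt T i states ↔ ∃ g ∈ states, solve T i g = true) := by
  intro k
  induction k with
  | zero =>
    intro i hk _ hle states
    have hidx : i = (T.length : Int) := by omega
    subst hidx
    rw [sweepAlt, if_pos rfl]
    constructor
    · intro h0
      refine ⟨0, h0, ?_⟩
      rw [solve, if_pos rfl]
      rfl
    · rintro ⟨g, hg, hs⟩
      rw [solve, if_pos rfl] at hs
      have : g = 0 := by simpa using hs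
      subst this
      exact hg
  | succ k ih =>
    intro i hk hge hle states
    have hlt : i < (T.length : Int) := by omega
    have hin : PySem.Raise.InRange T.length i := by constructor <;> omega
    obtain ⟨t, ht⟩ : ∃ t, PySem.List.pyGet? T i = some t := by
      cases h : PySem.List.pyGet? T i with
      | none => exact absurd ((PySem.List.pyGet?_eq_none_iff T i).mp h) (not_not_intro hin)
      | some t => exact ⟨t, rfl⟩
    have hstep : sweepAlt T i states = sweepAlt T (i + 1) (stepAlt t states) := by
      rw [sweepAlt, if_neg (by omega : ¬ i = (T.length : Int))]
      split
      next heq => rw [ht] at heq; cases heq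
      next t' heq => rw [ht] at heq; injection heq with heq'; subst heq'; rfl
    rw [hstep, ih (i + 1) (by omega) (by omega) (by omega)]
    constructor
    · rintro ⟨y, hy, hs⟩
      rw [mem_stepAlt] at hy
      obtain ⟨g, hg, v, hv, hc⟩ := hy
      refine ⟨g, hg, ?_⟩
      rw [solve, if_neg (by omega : ¬ i = (T.length : Int))]
      split
      next heq => rw [ht] at heq; cases heq
      next t' heq =>
      rw [ht] at heq; injection heq with heq'; subst heq'
      rw [List.any_eq_true]
      refine ⟨v, hv, ?_⟩
      simp only [Bool.or_eq_true, Bool.and_eq_true, decide_eq_true_eq, ge_iff_le]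
      rcases hc with ⟨hp, h0, rfl⟩ | ⟨hp, h6, rfl⟩
      · exact Or.inl ⟨⟨hp, by omega⟩, hs⟩
      · exact Or.inr ⟨⟨hp, by omega⟩, hs⟩
    · rintro ⟨g, hg, hs⟩
      rw [solve, if_neg (by omega : ¬ i = (T.length : Int))] at hs
      revert hs
      split
      next heq => rw [ht] at heq; cases heq
      next t' heq =>
      rw [ht] at heq; injection heq with heq'; subst heq'
      intro hs
      rw [List.any_eq_true] at hs
      obtain ⟨v, hv, hb⟩ := hs
      simp only [Bool.or_eq_true, Bool.and_eq_true, decide_eq_true_eq, ge_iff_le] at hb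
      rcases hb with ⟨⟨hp, h0⟩, hrec⟩ | ⟨⟨hp, h6⟩, hrec⟩
      · refine ⟨g - v, ?_, hrec⟩
        rw [mem_stepAlt]
        exact ⟨g, hg, v, hv, Or.inl ⟨hp, by omega, rfl⟩⟩
      · refine ⟨g + v, ?_, hrec⟩
        rw [mem_stepAlt]
        exact ⟨g, hg, v, hv, Or.inr ⟨hp, by omega, rfl⟩⟩

-- ===== VERDICT (by name: the statement is the Claim_ definition above) =====
theorem solve_spec : Claim_equal_solve := by
  intro T idx g _ hpre
  unfold Spec_solve solve_alt
  rw [Bool.eq_iff_iff, PySem.Set.contains_iff,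
    sweep_reaches_iff T ((T.length : Int) - idx).toNat idx rfl hpre.1 hpre.2]
  simp [PySem.Set.ofList]
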